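-- pv_equiv track=rewrite | github.com/murilohonorato/ANEEL-RAG | src/04_chunk.py | _join_split_parts
-- ===== SOURCE A (Python) =====
-- def _join_split_parts(parts: list[str]) -> list[str]:
--     """
--     Reconstrói segmentos após re.split com grupo de captura.
--     Formato de parts: [antes, delim, conteudo, delim, conteudo, ...]
--     """
--     result = []
--     # primeiro elemento é o texto antes do primeiro delimitador
--     if parts[0].strip():
--         result.append(parts[0].strip())
--     # depois vêm pares (delimitador, conteúdo)
--     i = 1
--     while i + 1 < len(parts):
--         segment = (parts[i] + parts[i + 1]).strip()
--         if segment: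
--             result.append(segment)
--         i += 2
--     return result
-- ===== SOURCE B (Python) =====
-- def _join_split_parts(parts: list[str]) -> list[str]:
--     """Two staged passes: first a single left-to-right fold with a
--     'pending delimiter' state machine reconstructs the raw segments
--     (parts[0] is the first raw segment; each later element either becomes
--     the pending delimiter or completes 'pending + element'; a delimiter
--     still pending at the end is discarded), then a second pass strips
--     every raw segment and keeps the non-empty ones."""
--     segments = [parts[0]]
--     pending = None
--     for p in parts[1:]:
--         if pending is None:
--             pending = p
--         else:
--             segments.append(pending + p)
--             pending = None
--     return [s for s in map(str.strip, segments) if s]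
-- ===== Notes on version B (the rewrite author's own statement) =====
-- stated objective: alternative
-- what changed: B replaces A's index-stepping while loop over (parts[i], parts[i+1]) pairs by two staged passes: a left-to-right fold with a pending-delimiter state machine that reconstructs the raw segments one element at a time (no index arithmetic, an unmatched pending delimiter is discarded), followed by a separate strip-and-filter pass.
import Mathlib
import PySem

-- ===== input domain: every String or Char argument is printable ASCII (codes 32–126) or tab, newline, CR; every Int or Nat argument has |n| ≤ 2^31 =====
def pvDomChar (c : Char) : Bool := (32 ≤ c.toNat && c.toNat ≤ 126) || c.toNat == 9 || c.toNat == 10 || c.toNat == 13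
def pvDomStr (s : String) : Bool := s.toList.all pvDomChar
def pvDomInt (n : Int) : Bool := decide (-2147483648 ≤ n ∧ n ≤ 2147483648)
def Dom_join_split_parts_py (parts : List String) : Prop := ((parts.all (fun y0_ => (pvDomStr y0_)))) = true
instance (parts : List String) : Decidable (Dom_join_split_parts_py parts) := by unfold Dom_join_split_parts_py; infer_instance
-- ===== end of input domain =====

-- B replaces A's index-stepping while loop over (parts[i], parts[i+1]) pairs by two
-- staged passes: a one-element-at-a-time fold with a pending-delimiter state machine
-- reconstructing the raw segments, then a separate strip-and-filter pass
-- (objective: alternative decomposition, same cost).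


-- ===== PORT A =====
-- the while loop: i steps by 2 while i + 1 < len(parts), appending the stripped pair
def joinLoopA (parts : List String) (i : Nat) (result : List String) : List String :=
  if i + 1 < parts.length then
    let segment := PySem.Str.strip (PySem.List.pyGetD parts (i : Int) "" ++ PySem.List.pyGetD parts ((i : Int) + 1) "")
    joinLoopA parts (i + 2) (if segment ≠ "" then result ++ [segment] else result)
  else result
termination_by parts.length - i

-- parts[0] raises IndexError on the empty list: excluded by Pre_ below (headD is unreachable there)
def join_split_parts_py (parts : List String) : List String :=
  let result : List String :=
    if PySem.Str.strip (parts.headD "") ≠ "" then [PySem.Str.strip (parts.headD "")] else []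
  joinLoopA parts 1 result

-- ===== PORT B =====
-- the for-loop body: state is (segments, pending); an element either becomes the
-- pending delimiter or completes 'pending + p' into a new raw segment
def smStep (st : List String × Option String) (p : String) : List String × Option String :=
  match st.2 with
  | none => (st.1, some p)
  | some d => (st.1 ++ [d ++ p], none)

-- pass 1: fold the state machine over parts[1:] starting from ([parts[0]], None);
-- pass 2: strip every raw segment and keep the non-empty ones
def join_split_parts_py_alt (parts : List String) : List String :=
  (((parts.tail.foldl smStep ([parts.headD ""], none)).1.map PySem.Str.strip).filter
    (fun s => s ≠ ""))

-- ===== PRECONDITION & SPEC =====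
-- Pre_ excludes only the empty list, on which A raises IndexError at parts[0]
def Pre_join_split_parts_py (parts : List String) : Prop := parts ≠ []
instance (parts : List String) : Decidable (Pre_join_split_parts_py parts) := by unfold Pre_join_split_parts_py; infer_instance
def pvWitness_join_split_parts_py : List String := ["intro ", "ART. 1", " body", "ART. 2", " more"]

def Spec_join_split_parts_py (parts : List String) (out : List String) : Prop := out = join_split_parts_py_alt parts
instance (parts : List String) (out : List String) : Decidable (Spec_join_split_parts_py parts out) := by unfold Spec_join_split_parts_py; infer_instance

-- ===== CLAIM (what is proved, stated in full; the proofs are below) =====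
def Claim_equal_join_split_parts_py : Prop := ∀ (parts : List String), Dom_join_split_parts_py parts → Pre_join_split_parts_py parts → Spec_join_split_parts_py parts (join_split_parts_py parts)

-- ===== LEMMAS AND PROOFS =====

-- raw segments made of consecutive pairs (an unpaired last element is dropped)
def pairJoin : List String → List String
  | a :: b :: t => (a ++ b) :: pairJoin t
  | _ => []

-- pass 1 of B, started with no pending delimiter, appends exactly the paired joins
theorem foldl_smStep_none (l segs : List String) :
    (l.foldl smStep (segs, none)).1 = segs ++ pairJoin l := by
  match l with
  | [] => simp [pairJoin]
  | [a] => simp [pairJoin, smStep]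
  | a :: b :: t =>
    show ((b :: t).foldl smStep (smStep (segs, none) a)).1 = _
    simp only [smStep]
    show (t.foldl smStep (segs ++ [a ++ b], none)).1 = _
    rw [foldl_smStep_none, pairJoin]
    simp

-- A's loop from index i is the strip-and-filter of the paired joins of the dropped suffix
theorem joinLoopA_eq_pipeline (parts : List String) (i : Nat) (r : List String) :
    joinLoopA parts i r = r ++ ((pairJoin (parts.drop i)).map PySem.Str.strip).filter (fun s => s ≠ "") := by
  rw [joinLoopA]
  split
  · rename_i h
    have h1 : i < parts.length := by omega
    have h2 : i + 1 < parts.length := h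
    have hdrop : parts.drop i = parts[i] :: parts[i+1] :: parts.drop (i + 2) := by
      rw [List.drop_eq_getElem_cons h1, List.drop_eq_getElem_cons h2]
    have hg1 : PySem.List.pyGetD parts (i : Int) "" = parts[i] := by
      rw [PySem.List.pyGetD_natCast]
      simp [List.getD, List.getElem?_eq_getElem h1]
    have hg2 : PySem.List.pyGetD parts ((i : Int) + 1) "" = parts[i+1] := by
      have hc : ((i : Int) + 1) = ((i + 1 : Nat) : Int) := by push_cast; ring
      rw [hc, PySem.List.pyGetD_natCast]
      simp [List.getD, List.getElem?_eq_getElem h2]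
    rw [joinLoopA_eq_pipeline parts (i + 2)]
    rw [hdrop, pairJoin, hg1, hg2]
    split <;> simp_all
  · rename_i h
    have : parts.drop i = [] ∨ ∃ a, parts.drop i = [a] := by
      rcases hd : parts.drop i with _ | ⟨a, _ | _⟩
      · exact Or.inl rfl
      · exact Or.inr ⟨a, rfl⟩
      · exfalso
        have := List.length_drop (l := parts) (i := i)
        rw [hd] at this
        simp at this
        omega
    rcases this with h0 | ⟨a, h1⟩
    · simp [h0, pairJoin]
    · simp [h1, pairJoin]
termination_by parts.length - i

-- ===== VERDICT (by name: the statement is the Claim_ definition above) =====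
theorem join_split_parts_py_spec : Claim_equal_join_split_parts_py := by
  intro parts _ hpre
  unfold Spec_join_split_parts_py join_split_parts_py join_split_parts_py_alt
  rcases parts with _ | ⟨p0, t⟩
  · exact absurd rfl hpre
  · rw [joinLoopA_eq_pipeline, foldl_smStep_none]
    simp only [List.headD, List.drop_succ_cons, List.drop_zero, List.map_append,
      List.map_cons, List.map_nil, List.filter_append, List.filter_cons]
    split <;> simp_all
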